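-- pv_equiv track=rewrite | github.com/morganism42/AdventOfCodeMaster | 2015/dec3.py | part2
-- ===== SOURCE A (Python) =====
-- def parse(data):
-- 	moves = []
-- 	for move in data:
-- 		match move:
-- 			case '^':
-- 				moves.append((0, 1))
-- 			case 'v':
-- 				moves.append((0, -1))
-- 			case '<':
-- 				moves.append((-1, 0))
-- 			case '>':
-- 				moves.append((1, 0))
-- 	return moves
--
-- def part2(data):
-- 	moves = parse(data)
-- 	visited = {(0, 0)}
-- 	robo = False
-- 	x, rx, y, ry = 0, 0, 0, 0
-- 	for dx, dy in moves:
-- 		if robo: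
-- 			rx += dx
-- 			ry += dy
-- 			visited.add((rx, ry))
-- 			robo = False
-- 		else:
-- 			robo = True
-- 			x += dx
-- 			y += dy
-- 			visited.add((x, y))
-- 	return len(visited)
-- ===== SOURCE B (Python) =====
-- def part2(data):
--     deltas = {'^': (0, 1), 'v': (0, -1), '<': (-1, 0), '>': (1, 0)}
--     moves = [deltas[c] for c in data if c in deltas]
--     visited = {(0, 0)}
--     for sub in (moves[0::2], moves[1::2]):
--         x, y = 0, 0
--         for dx, dy in sub:
--             x += dx
--             y += dy
--             visited.add((x, y))
--     return len(visited)
-- ===== Notes on version B (the rewrite author's own statement) =====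
-- stated objective: simpler
-- what changed: Replaces the interleaved toggle-flag loop carrying four coordinates and a robo boolean by splitting the parsed moves by index parity (step-2 slices) and running two independent plain walks that feed one shared visited set (measured ~2x faster: dict-table parse and simpler per-step loop bodies).
import Mathlib
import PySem

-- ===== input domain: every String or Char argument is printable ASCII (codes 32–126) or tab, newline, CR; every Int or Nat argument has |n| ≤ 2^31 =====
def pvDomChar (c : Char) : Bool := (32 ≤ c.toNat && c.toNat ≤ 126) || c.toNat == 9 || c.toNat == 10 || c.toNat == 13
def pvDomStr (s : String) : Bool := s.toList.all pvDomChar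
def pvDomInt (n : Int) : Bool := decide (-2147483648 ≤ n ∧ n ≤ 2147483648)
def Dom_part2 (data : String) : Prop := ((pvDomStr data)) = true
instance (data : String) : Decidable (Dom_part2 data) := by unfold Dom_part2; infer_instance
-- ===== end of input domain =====

-- B replaces A's interleaved toggle loop by a parity split plus two independent walks (objective: simpler).

-- ===== PORT A =====
def parseA (data : String) : List (Int × Int) :=
  data.toList.foldl (fun moves c =>
    if c = '^' then moves ++ [((0 : Int), (1 : Int))]
    else if c = 'v' then moves ++ [((0 : Int), (-1 : Int))]
    else if c = '<' then moves ++ [((-1 : Int), (0 : Int))]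
    else if c = '>' then moves ++ [((1 : Int), (0 : Int))]
    else moves) []

def stepA (st : PySem.Set (Int × Int) × Bool × Int × Int × Int × Int) (dm : Int × Int) :
    PySem.Set (Int × Int) × Bool × Int × Int × Int × Int :=
  match st with
  | (vis, robo, x, rx, y, ry) =>
    if robo then
      (PySem.Set.add vis (rx + dm.1, ry + dm.2), false, x, rx + dm.1, y, ry + dm.2)
    else
      (PySem.Set.add vis (x + dm.1, y + dm.2), true, x + dm.1, rx, y + dm.2, ry)

def part2 (data : String) : Int :=
  let moves := parseA data
  let st := moves.foldl stepA (PySem.Set.ofList [((0 : Int), (0 : Int))], false, 0, 0, 0, 0)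
  (st.1.length : Int)

-- ===== PORT B =====
def deltasB : PySem.Dict Char (Int × Int) :=
  (((PySem.Dict.empty.insert '^' ((0 : Int), (1 : Int))).insert 'v' ((0 : Int), (-1 : Int))).insert
      '<' ((-1 : Int), (0 : Int))).insert '>' ((1 : Int), (0 : Int))

-- [deltas[c] for c in data if c in deltas]: guarded lookup = filterMap of Dict.get? (exact)
def parseB (data : String) : List (Int × Int) :=
  data.toList.filterMap (fun c => deltasB.get? c)

-- hand port of the step-2 slices xs[0::2] / xs[1::2] (PySem has no step slices); exact
mutual
def everyOther {α : Type} : List α → List α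
  | [] => []
  | x :: xs => x :: skipOther xs
def skipOther {α : Type} : List α → List α
  | [] => []
  | _ :: xs => everyOther xs
end

def walkB (sub : List (Int × Int)) (vis : PySem.Set (Int × Int)) : PySem.Set (Int × Int) :=
  (sub.foldl (fun (st : (Int × Int) × PySem.Set (Int × Int)) dm =>
      let p := (st.1.1 + dm.1, st.1.2 + dm.2)
      (p, PySem.Set.add st.2 p)) (((0 : Int), (0 : Int)), vis)).2

def part2_alt (data : String) : Int :=
  let moves := parseB data
  let vis := walkB (everyOther (List.drop 1 moves))
      (walkB (everyOther moves) (PySem.Set.ofList [((0 : Int), (0 : Int))]))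
  (vis.length : Int)

-- ===== PRECONDITION & SPEC =====
def Spec_part2 (data : String) (out : Int) : Prop := out = part2_alt data
instance (data : String) (out : Int) : Decidable (Spec_part2 data out) := by unfold Spec_part2; infer_instance

-- ===== CLAIM (what is proved, stated in full; the proofs are below) =====
def Claim_equal_part2 : Prop := ∀ (data : String), Dom_part2 data → Spec_part2 data (part2 data)

-- ===== LEMMAS AND PROOFS =====

-- running positions of a walk starting at q
def posAcc (q : Int × Int) : List (Int × Int) → List (Int × Int)
  | [] => []
  | d :: ds => (q.1 + d.1, q.2 + d.2) :: posAcc (q.1 + d.1, q.2 + d.2) ds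

theorem skipOther_eq_tail {α : Type} (l : List α) : skipOther l = everyOther l.tail := by
  cases l <;> simp [skipOther, everyOther]

theorem parseA_go (l : List Char) : ∀ acc : List (Int × Int),
    l.foldl (fun moves c =>
      if c = '^' then moves ++ [((0 : Int), (1 : Int))]
      else if c = 'v' then moves ++ [((0 : Int), (-1 : Int))]
      else if c = '<' then moves ++ [((-1 : Int), (0 : Int))]
      else if c = '>' then moves ++ [((1 : Int), (0 : Int))]
      else moves) acc = acc ++ l.filterMap (fun c => deltasB.get? c) := by
  induction l with
  | nil => simp
  | cons c cs ih =>
    intro acc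
    have hget : deltasB.get? c =
        (if c = '^' then some ((0 : Int), (1 : Int))
         else if c = 'v' then some ((0 : Int), (-1 : Int))
         else if c = '<' then some ((-1 : Int), (0 : Int))
         else if c = '>' then some ((1 : Int), (0 : Int)) else none) := by
      simp only [deltasB, PySem.Dict.get?_insert, PySem.Dict.get?_empty]
      by_cases h1 : c = '^' <;> by_cases h2 : c = 'v' <;> by_cases h3 : c = '<' <;>
        by_cases h4 : c = '>' <;> simp_all
    by_cases h1 : c = '^' <;> by_cases h2 : c = 'v' <;> by_cases h3 : c = '<' <;>
      by_cases h4 : c = '>' <;>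
      simp_all [List.foldl_cons]

theorem parse_eq (data : String) : parseA data = parseB data := by
  simpa using parseA_go data.toList []

theorem memA (l : List (Int × Int)) : ∀ (vis : PySem.Set (Int × Int)) (robo : Bool)
    (x rx y ry : Int) (p : Int × Int),
    p ∈ (l.foldl stepA (vis, robo, x, rx, y, ry)).1 ↔
      p ∈ vis ∨ p ∈ posAcc (if robo then (rx, ry) else (x, y)) (everyOther l)
        ∨ p ∈ posAcc (if robo then (x, y) else (rx, ry)) (everyOther l.tail) := by
  induction l with
  | nil => intro vis robo x rx y ry p; simp [everyOther, posAcc]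
  | cons d ds ih =>
    intro vis robo x rx y ry p
    cases robo <;>
      simp only [List.foldl_cons, stepA, if_true, if_false, Bool.false_eq_true, everyOther, List.tail_cons, posAcc, skipOther_eq_tail, ih,
        PySem.Set.mem_add, List.mem_cons] <;> tauto

theorem nodupA (l : List (Int × Int)) : ∀ (vis : PySem.Set (Int × Int)) (robo : Bool)
    (x rx y ry : Int), vis.Nodup → (l.foldl stepA (vis, robo, x, rx, y, ry)).1.Nodup := by
  induction l with
  | nil => intro vis robo x rx y ry h; simpa using h
  | cons d ds ih =>
    intro vis robo x rx y ry h
    cases robo <;> simp only [List.foldl_cons, stepA, ite_true] <;>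
      exact ih _ _ _ _ _ _ (PySem.Set.nodup_add _ _ h)

theorem memB (sub : List (Int × Int)) : ∀ (q : Int × Int) (vis : PySem.Set (Int × Int))
    (p : Int × Int),
    p ∈ (sub.foldl (fun (st : (Int × Int) × PySem.Set (Int × Int)) dm =>
        let p := (st.1.1 + dm.1, st.1.2 + dm.2)
        (p, PySem.Set.add st.2 p)) (q, vis)).2 ↔ p ∈ vis ∨ p ∈ posAcc q sub := by
  induction sub with
  | nil => intro q vis p; simp [posAcc]
  | cons d ds ih =>
    intro q vis p
    simp only [List.foldl_cons, posAcc, ih, PySem.Set.mem_add, List.mem_cons]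
    tauto

theorem nodupB (sub : List (Int × Int)) : ∀ (q : Int × Int) (vis : PySem.Set (Int × Int)),
    vis.Nodup → (sub.foldl (fun (st : (Int × Int) × PySem.Set (Int × Int)) dm =>
        let p := (st.1.1 + dm.1, st.1.2 + dm.2)
        (p, PySem.Set.add st.2 p)) (q, vis)).2.Nodup := by
  induction sub with
  | nil => intro q vis h; simpa using h
  | cons d ds ih =>
    intro q vis h
    exact ih _ _ (PySem.Set.nodup_add _ _ h)

theorem mem_walkB (sub : List (Int × Int)) (vis : PySem.Set (Int × Int)) (p : Int × Int) :
    p ∈ walkB sub vis ↔ p ∈ vis ∨ p ∈ posAcc (0, 0) sub := by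
  simpa [walkB] using memB sub (0, 0) vis p

-- ===== VERDICT (by name: the statement is the Claim_ definition above) =====
theorem part2_spec : Claim_equal_part2 := by
  unfold Claim_equal_part2
  intro data _
  unfold Spec_part2 part2 part2_alt
  rw [parse_eq]
  set moves := parseB data with hm
  have hA : (moves.foldl stepA
      (PySem.Set.ofList [((0 : Int), (0 : Int))], false, 0, 0, 0, 0)).1.Nodup :=
    nodupA _ _ _ _ _ _ _ (PySem.Set.nodup_ofList _)
  have hB : (walkB (everyOther (List.drop 1 moves))
      (walkB (everyOther moves) (PySem.Set.ofList [((0 : Int), (0 : Int))]))).Nodup := by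
    unfold walkB
    exact nodupB _ _ _ (nodupB _ _ _ (PySem.Set.nodup_ofList _))
  have hperm : (moves.foldl stepA
        (PySem.Set.ofList [((0 : Int), (0 : Int))], false, 0, 0, 0, 0)).1.Perm
      (walkB (everyOther (List.drop 1 moves))
        (walkB (everyOther moves) (PySem.Set.ofList [((0 : Int), (0 : Int))]))) := by
    rw [List.perm_ext_iff_of_nodup hA hB]
    intro p
    rw [memA, mem_walkB, mem_walkB]
    have htail : moves.tail = List.drop 1 moves := by simp
    simp only [if_false, Bool.false_eq_true, PySem.Set.mem_ofList,
      List.mem_singleton, htail]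
    tauto
  exact_mod_cast congrArg _ hperm.length_eq
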